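-- pv_equiv track=rewrite | github.com/leechi2/LCL_WORLD | week8 work3.py | solution
-- ===== SOURCE A (Python) =====
-- def solution(N, start, end, counts):
--     answer = 0
--     base = ['0', '1', '2', '3', '4', '5', '6', '7', '8', '9', 'a', 'b', 'c', 'd', 'e', 'f', 'g', 'h', 'i', 'j', 'k', 'l', 'm', 'n', 'o','p', 'q', 'r', 's', 't', 'u', 'v', 'w', 'x', 'y', 'z', 'A', 'B', 'C', 'D', 'E', 'F', 'G', 'H', 'I', 'J','K', 'L', 'M', 'N', 'O', 'P', 'Q', 'R', 'S', 'T', 'U', 'V', 'W', 'X', 'Y', 'Z']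
--
--     # 입력 받은거를 10진수로 바꿔주는 함수
--     def int(x):
--         xxxxxxx = 0
--         test = list(x)
--         temp = 0
--         for i in range(len(test)):
--             for p in range(len(base)):
--                 if test[i] == base[p]:
--                     temp = p
--             # list[i] 를 정수로 바꿔야됨
--             xxxxxxx += temp * (N ** (len(test) - i - 1))
--         return xxxxxxx
--
--     # 다시 N 진수로 바꿔주는 함수
--     def trans(x):
--         result = []
--
--         remain = 0
--         quot = x
--         while quot != 0:
--             remain = quot % N
--             result.append(base[remain])
--             quot = quot // N
--
--         return list(reversed(result))
--     alpha = int(start)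
--     omega = int(end)
--     count_list = []
--
--     for i in range(omega - alpha + 1):
--         temp = trans(alpha + i)
--         temp = "".join(temp)
--         count_list.append(temp)
--     answer = len(counts)
--     for abc in range(len(count_list)):
--         if count_list[abc] == counts[abc]:
--             answer -= 1
--
--
--
--
--
--
--
--     return answer
-- ===== SOURCE B (Python) =====
-- def solution(N, start, end, counts):
--     base = ['0', '1', '2', '3', '4', '5', '6', '7', '8', '9', 'a', 'b', 'c', 'd', 'e', 'f', 'g', 'h', 'i', 'j', 'k', 'l', 'm', 'n', 'o','p', 'q', 'r', 's', 't', 'u', 'v', 'w', 'x', 'y', 'z', 'A', 'B', 'C', 'D', 'E', 'F', 'G', 'H', 'I', 'J','K', 'L', 'M', 'N', 'O', 'P', 'Q', 'R', 'S', 'T', 'U', 'V', 'W', 'X', 'Y', 'Z']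
--
--     # same custom parser as the original (its quirks are part of the behaviour)
--     def val(x):
--         total = 0
--         test = list(x)
--         temp = 0
--         for i in range(len(test)):
--             for p in range(len(base)):
--                 if test[i] == base[p]:
--                     temp = p
--             total += temp * (N ** (len(test) - i - 1))
--         return total
--
--     alpha = val(start)
--     omega = val(end)
--     n_items = omega - alpha + 1
--     if n_items <= 0:
--         return len(counts)
--     # running base-N odometer: digits of the current value, least-significant first
--     digits = []
--     x = alpha
--     while x != 0:
--         digits.append(x % N)
--         x //= N
--     answer = len(counts)
--     for idx in range(n_items):
--         if "".join(base[d] for d in reversed(digits)) == counts[idx]: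
--             answer -= 1
--         # increment the odometer by one (carry propagation)
--         j = 0
--         while j < len(digits) and digits[j] == N - 1:
--             digits[j] = 0
--             j += 1
--         if j == len(digits):
--             digits.append(1)
--         else:
--             digits[j] += 1
--     return answer
-- ===== Notes on version B (the rewrite author's own statement) =====
-- stated objective: alternative
-- what changed: Instead of materialising the whole list of base-N representations by repeated division per value and then scanning it, B keeps a running base-N odometer (digit list, least-significant first) for the current value, rendering and comparing each representation on the fly and incrementing by carry propagation, with an early return for empty ranges.
-- outside the precondition, e.g. on solution(-2, '110', '111', ['Z0', 'Z1']): A returns 1, B returns 0; on solution(1, '0', '1', ['', '']): A does not finish within the time limit, B returns 1; on solution(100, '1', '2', ['1', '2']): A returns 0, B returns 0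
import Mathlib
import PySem

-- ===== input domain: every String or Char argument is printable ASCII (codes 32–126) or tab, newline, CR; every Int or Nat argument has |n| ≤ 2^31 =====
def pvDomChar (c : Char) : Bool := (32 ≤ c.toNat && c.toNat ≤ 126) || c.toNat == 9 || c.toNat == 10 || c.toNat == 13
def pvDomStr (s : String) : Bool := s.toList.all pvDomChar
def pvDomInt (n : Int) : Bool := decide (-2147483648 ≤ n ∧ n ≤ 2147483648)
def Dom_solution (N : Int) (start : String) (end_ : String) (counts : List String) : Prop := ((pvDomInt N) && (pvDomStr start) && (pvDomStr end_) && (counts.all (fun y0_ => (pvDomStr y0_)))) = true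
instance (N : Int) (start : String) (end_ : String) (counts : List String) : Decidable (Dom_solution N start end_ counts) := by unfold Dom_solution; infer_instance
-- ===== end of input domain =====

-- B replaces A's per-value repeated-division conversion and intermediate list of all representations
-- by a single running base-N odometer (digit list) rendered, compared and incremented in one pass.

-- the 62-character digit table shared by both Pythons
def pvBase : List Char :=
  ['0','1','2','3','4','5','6','7','8','9','a','b','c','d','e','f','g','h','i','j','k','l','m',
   'n','o','p','q','r','s','t','u','v','w','x','y','z','A','B','C','D','E','F','G','H','I','J',
   'K','L','M','N','O','P','Q','R','S','T','U','V','W','X','Y','Z']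

-- base[d] (Python list indexing; in range on every input admitted by Pre_)
def pvCharOf (d : Int) : Char := PySem.List.pyGetD pvBase d ' '

-- the custom parser `int`/`val`, textually identical in A and in B (B keeps A's parser on purpose):
-- temp is the LAST matching table index and persists across unrecognised characters
def pvParse (N : Int) (x : String) : Int :=
  (let test := x.toList
   (PySem.List.pyRange 0 (test.length : Int) 1).foldl
     (fun (st : Int × Int) i =>
       let temp := (PySem.List.pyRange 0 (pvBase.length : Int) 1).foldl
         (fun t p => if PySem.List.pyGetD test i ' ' = PySem.List.pyGetD pvBase p ' ' then p else t) st.2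
       (st.1 + temp * N ^ ((test.length : Int) - i - 1).toNat, temp))
     (0, 0)).1

-- ===== PORT A =====
-- A's `trans` while-loop: repeated division, digits appended least-significant first
-- (fuel makes it total; natAbs x + 1 iterations suffice on every input admitted by Pre_)
def transGo (N : Int) : Nat → Int → List Char → List Char
  | 0, _, res => res
  | f + 1, q, res =>
      if q = 0 then res
      else transGo N f (PySem.Int.floordiv q N) (res ++ [pvCharOf (PySem.Int.mod q N)])

def transA (N : Int) (x : Int) : List Char := (transGo N (x.natAbs + 1) x []).reverse

def solution (N : Int) (start : String) (end_ : String) (counts : List String) : Int :=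
  let alpha := pvParse N start
  let omega := pvParse N end_
  let countList := (PySem.List.pyRange 0 (omega - alpha + 1) 1).foldl
      (fun lst i => lst ++ [String.mk (transA N (alpha + i))]) ([] : List String)
  (PySem.List.pyRange 0 (countList.length : Int) 1).foldl
    (fun ans abc =>
      if PySem.List.pyGetD countList abc "" = PySem.List.pyGetD counts abc "" then ans - 1 else ans)
    (counts.length : Int)

-- ===== PORT B =====
-- digits of alpha, least-significant first (the `while x != 0` loop of Source B; fuel makes it total)
def bdigitsGo (N : Int) : Nat → Int → List Int
  | 0, _ => []
  | f + 1, x =>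
      if x = 0 then []
      else PySem.Int.mod x N :: bdigitsGo N f (PySem.Int.floordiv x N)

def bdigits (N : Int) (x : Int) : List Int := bdigitsGo N (x.natAbs + 1) x

-- Source B's carry loop: zero out trailing (N-1)-digits, bump the next digit, append 1 on overflow
def incDigits (N : Int) : List Int → List Int
  | [] => [1]
  | d :: ds => if d = N - 1 then 0 :: incDigits N ds else (d + 1) :: ds

-- '"".join(base[d] for d in reversed(digits))'
def render (ds : List Int) : String := String.mk (ds.reverse.map pvCharOf)

def solution_alt (N : Int) (start : String) (end_ : String) (counts : List String) : Int :=
  let alpha := pvParse N start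
  let omega := pvParse N end_
  let nItems := omega - alpha + 1
  if nItems ≤ 0 then (counts.length : Int)
  else
    ((PySem.List.pyRange 0 nItems 1).foldl
      (fun (st : List Int × Int) idx =>
        (incDigits N st.1,
         if render st.1 = PySem.List.pyGetD counts idx "" then st.2 - 1 else st.2))
      (bdigits N alpha, (counts.length : Int))).2

-- ===== PRECONDITION & SPEC =====
-- Pre_ excludes exactly the inputs on which A does not return an ordinary value (IndexError when the
-- enumerated range is longer than counts or a digit falls outside the 62-entry table for N > 62,
-- ZeroDivisionError for N = 0, divergence for N = 1 and for negative values) together with the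
-- negative-base corner, whose digit strings arise only from Python's negative-index wraparound into
-- the digit table — an accidental corner no caller would specify.
def Pre_solution (N : Int) (start : String) (end_ : String) (counts : List String) : Prop :=
  pvParse N end_ < pvParse N start ∨
  (2 ≤ N ∧ N ≤ 62 ∧ pvParse N end_ - pvParse N start + 1 ≤ (counts.length : Int))

instance (N : Int) (start : String) (end_ : String) (counts : List String) : Decidable (Pre_solution N start end_ counts) := by
  unfold Pre_solution; infer_instance

def pvWitness_solution : Int × String × String × List String := (2, "1", "11", ["1", "10", "11"])

def Spec_solution (N : Int) (start : String) (end_ : String) (counts : List String) (out : Int) : Prop := out = solution_alt N start end_ counts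
instance (N : Int) (start : String) (end_ : String) (counts : List String) (out : Int) : Decidable (Spec_solution N start end_ counts out) := by unfold Spec_solution; infer_instance

-- ===== CLAIM (what is proved, stated in full; the proofs are below) =====
def Claim_equal_solution : Prop := ∀ (N : Int) (start : String) (end_ : String) (counts : List String), Dom_solution N start end_ counts → Pre_solution N start end_ counts → Spec_solution N start end_ counts (solution N start end_ counts)

-- ===== LEMMAS AND PROOFS =====

theorem fd_nonneg (N x : Int) (hN : 2 ≤ N) (hx : 0 ≤ x) : 0 ≤ PySem.Int.floordiv x N := by
  rw [PySem.Int.floordiv_eq_ediv_of_pos (by omega)]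
  exact Int.ediv_nonneg hx (by omega)

theorem fd_natAbs_lt (N x : Int) (hN : 2 ≤ N) (hx : 0 < x) :
    (PySem.Int.floordiv x N).natAbs < x.natAbs := by
  rw [PySem.Int.floordiv_eq_ediv_of_pos (by omega)]
  have h1 : x / N < x := by apply Int.ediv_lt_of_lt_mul (by omega); nlinarith
  have h2 : 0 ≤ x / N := Int.ediv_nonneg (by omega) (by omega)
  omega

theorem bdigitsGo_fuel (N : Int) (hN : 2 ≤ N) :
    ∀ (n : Nat) (x : Int) (f₁ f₂ : Nat), x.natAbs ≤ n → 0 ≤ x →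
      x.natAbs < f₁ → x.natAbs < f₂ → bdigitsGo N f₁ x = bdigitsGo N f₂ x := by
  intro n
  induction n with
  | zero =>
    intro x f₁ f₂ hn hx h1 h2
    have hx0 : x = 0 := by omega
    subst hx0
    obtain ⟨g₁, rfl⟩ : ∃ g, f₁ = g + 1 := ⟨f₁ - 1, by omega⟩
    obtain ⟨g₂, rfl⟩ : ∃ g, f₂ = g + 1 := ⟨f₂ - 1, by omega⟩
    simp [bdigitsGo]
  | succ n ih =>
    intro x f₁ f₂ hn hx h1 h2
    obtain ⟨g₁, rfl⟩ : ∃ g, f₁ = g + 1 := ⟨f₁ - 1, by omega⟩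
    obtain ⟨g₂, rfl⟩ : ∃ g, f₂ = g + 1 := ⟨f₂ - 1, by omega⟩
    by_cases hx0 : x = 0
    · simp [bdigitsGo, hx0]
    · have hxp : 0 < x := by omega
      have hlt := fd_natAbs_lt N x hN hxp
      have hnn := fd_nonneg N x hN hx
      simp only [bdigitsGo, hx0]
      rw [ih (PySem.Int.floordiv x N) g₁ g₂ (by omega) hnn (by omega) (by omega)]

theorem bdigits_pos (N : Int) (hN : 2 ≤ N) (x : Int) (hx : 0 < x) :
    bdigits N x = PySem.Int.mod x N :: bdigits N (PySem.Int.floordiv x N) := by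
  have hx0 : x ≠ 0 := by omega
  have hlt := fd_natAbs_lt N x hN hx
  have hnn := fd_nonneg N x hN (by omega)
  show bdigitsGo N (x.natAbs + 1) x = _
  simp only [bdigitsGo, hx0]
  rw [bdigitsGo_fuel N hN (PySem.Int.floordiv x N).natAbs (PySem.Int.floordiv x N) x.natAbs
    ((PySem.Int.floordiv x N).natAbs + 1) le_rfl hnn (by omega) (by omega)]
  rfl

theorem step_arith (N x : Int) (hN : 2 ≤ N) (_hx : 0 ≤ x) :
    (PySem.Int.mod x N = N - 1 →
      PySem.Int.mod (x+1) N = 0 ∧ PySem.Int.floordiv (x+1) N = PySem.Int.floordiv x N + 1) ∧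
    (PySem.Int.mod x N ≠ N - 1 →
      PySem.Int.mod (x+1) N = PySem.Int.mod x N + 1 ∧
      PySem.Int.floordiv (x+1) N = PySem.Int.floordiv x N) := by
  have heq := PySem.Int.floordiv_mul_add_mod x N
  have heq' := PySem.Int.floordiv_mul_add_mod (x+1) N
  have h0 := PySem.Int.mod_nonneg x (b := N) (by omega)
  have h1 := PySem.Int.mod_lt x (b := N) (by omega)
  have e1 : (PySem.Int.floordiv x N + 1) * N = PySem.Int.floordiv x N * N + N := by ring
  have e2 : (PySem.Int.floordiv x N + 1 + 1) * N = PySem.Int.floordiv x N * N + N + N := by ring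
  constructor
  · intro hr
    have hfd : PySem.Int.floordiv (x+1) N = PySem.Int.floordiv x N + 1 := by
      rw [PySem.Int.floordiv_eq_iff_of_pos (by omega)]
      constructor
      · linarith
      · linarith
    refine ⟨?_, hfd⟩
    rw [hfd] at heq'
    linarith
  · intro hr
    have hr' : PySem.Int.mod x N ≤ N - 2 := by omega
    have hfd : PySem.Int.floordiv (x+1) N = PySem.Int.floordiv x N := by
      rw [PySem.Int.floordiv_eq_iff_of_pos (by omega)]
      constructor
      · linarith
      · linarith
    refine ⟨?_, hfd⟩
    rw [hfd] at heq'
    linarith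

theorem incDigits_bdigits (N : Int) (hN : 2 ≤ N) :
    ∀ (n : Nat) (x : Int), x.natAbs ≤ n → 0 ≤ x →
      incDigits N (bdigits N x) = bdigits N (x + 1) := by
  intro n
  induction n with
  | zero =>
    intro x hn _
    have hx0 : x = 0 := by omega
    subst hx0
    have hfd : PySem.Int.floordiv 1 N = 0 := by
      rw [PySem.Int.floordiv_eq_iff_of_pos (by omega)]; constructor <;> omega
    have hm : PySem.Int.mod 1 N = 1 := by
      have h := PySem.Int.floordiv_mul_add_mod 1 N
      rw [hfd] at h; omega
    rw [show (0:Int) + 1 = 1 from rfl, bdigits_pos N hN 1 (by omega), hm, hfd]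
    simp [bdigits, bdigitsGo, incDigits]
  | succ n ih =>
    intro x hn hx
    by_cases hx0 : x = 0
    · subst hx0; exact ih 0 (by omega) le_rfl
    · have hxp : 0 < x := by omega
      have harith := step_arith N x hN hx
      have hlt := fd_natAbs_lt N x hN hxp
      have hnn := fd_nonneg N x hN hx
      rw [bdigits_pos N hN x hxp, bdigits_pos N hN (x+1) (by omega)]
      by_cases hr : PySem.Int.mod x N = N - 1
      · obtain ⟨hm, hf⟩ := harith.1 hr
        have h2 : incDigits N (PySem.Int.mod x N :: bdigits N (PySem.Int.floordiv x N))
            = 0 :: incDigits N (bdigits N (PySem.Int.floordiv x N)) := by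
          simp [incDigits, hr]
        rw [h2, ih _ (by omega) hnn, hm, hf]
      · obtain ⟨hm, hf⟩ := harith.2 hr
        have h2 : incDigits N (PySem.Int.mod x N :: bdigits N (PySem.Int.floordiv x N))
            = (PySem.Int.mod x N + 1) :: bdigits N (PySem.Int.floordiv x N) := by
          simp [incDigits, hr]
        rw [h2, hm, hf]

theorem transGo_eq (N : Int) (hN : 2 ≤ N) :
    ∀ (n : Nat) (x : Int) (f : Nat) (res : List Char), x.natAbs ≤ n → 0 ≤ x → x.natAbs < f →
      transGo N f x res = res ++ (bdigits N x).map pvCharOf := by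
  intro n
  induction n with
  | zero =>
    intro x f res hn hx hf
    have hx0 : x = 0 := by omega
    subst hx0
    obtain ⟨g, rfl⟩ : ∃ g, f = g + 1 := ⟨f - 1, by omega⟩
    simp [transGo, bdigits, bdigitsGo]
  | succ n ih =>
    intro x f res hn hx hf
    obtain ⟨g, rfl⟩ : ∃ g, f = g + 1 := ⟨f - 1, by omega⟩
    by_cases hx0 : x = 0
    · subst hx0; simp [transGo, bdigits, bdigitsGo]
    · have hxp : 0 < x := by omega
      have hlt := fd_natAbs_lt N x hN hxp
      have hnn := fd_nonneg N x hN hx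
      simp only [transGo, hx0]
      rw [ih (PySem.Int.floordiv x N) g _ (by omega) hnn (by omega),
          bdigits_pos N hN x hxp]
      simp

theorem transA_render (N : Int) (hN : 2 ≤ N) (x : Int) (hx : 0 ≤ x) :
    String.mk (transA N x) = render (bdigits N x) := by
  unfold transA render
  rw [transGo_eq N hN x.natAbs x (x.natAbs + 1) [] le_rfl hx (by omega)]
  simp [List.map_reverse]

theorem loop_fst (N : Int) (hN : 2 ≤ N) (alpha : Int) (ha : 0 ≤ alpha)
    (c : Nat → String) (ans : Int) (M : Nat) :
    ((List.range M).foldl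
      (fun (st : List Int × Int) k =>
        (incDigits N st.1, if render st.1 = c k then st.2 - 1 else st.2))
      (bdigits N alpha, ans)).1 = bdigits N (alpha + M) := by
  induction M generalizing ans with
  | zero => simp
  | succ M ih =>
    rw [List.range_succ, List.foldl_append]
    simp only [List.foldl_cons, List.foldl_nil]
    rw [ih]
    show incDigits N (bdigits N (alpha + (M:Int))) = _
    rw [incDigits_bdigits N hN (alpha + (M:Int)).natAbs (alpha + (M:Int)) le_rfl (by omega)]
    push_cast
    ring_nf

theorem loop_eq (N : Int) (hN : 2 ≤ N) (alpha : Int) (ha : 0 ≤ alpha)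
    (c : Nat → String) (M : Nat) : ∀ (ans : Int),
    ((List.range M).foldl
      (fun (st : List Int × Int) k =>
        (incDigits N st.1, if render st.1 = c k then st.2 - 1 else st.2))
      (bdigits N alpha, ans)).2
    = (List.range M).foldl
        (fun ans (k : Nat) => if render (bdigits N (alpha + (k:Int))) = c k then ans - 1 else ans) ans := by
  induction M with
  | zero => intro ans; simp
  | succ M ih =>
    intro ans
    rw [List.range_succ, List.foldl_append, List.foldl_append]
    simp only [List.foldl_cons, List.foldl_nil]
    have h1 := loop_fst N hN alpha ha c ans M
    rw [h1, ih ans]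

theorem foldl_pick_nonneg (test : List Char) (i : Int) :
    ∀ (l : List Int), (∀ p ∈ l, 0 ≤ p) → ∀ t, 0 ≤ t →
      0 ≤ l.foldl (fun t p => if PySem.List.pyGetD test i ' ' = PySem.List.pyGetD pvBase p ' ' then p else t) t := by
  intro l
  induction l with
  | nil => intro _ t ht; simpa using ht
  | cons p ps ih =>
    intro hl t ht
    simp only [List.foldl_cons]
    apply ih (fun q hq => hl q (List.mem_cons_of_mem _ hq))
    split_ifs
    · exact hl p (List.mem_cons_self)
    · exact ht

theorem pvParse_nonneg (N : Int) (hN : 0 ≤ N) (x : String) : 0 ≤ pvParse N x := by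
  unfold pvParse
  have aux : ∀ (L : List Int) (st : Int × Int), 0 ≤ st.1 → 0 ≤ st.2 →
      0 ≤ (L.foldl
        (fun (st : Int × Int) i =>
          let temp := (PySem.List.pyRange 0 (pvBase.length : Int) 1).foldl
            (fun t p => if PySem.List.pyGetD x.toList i ' ' = PySem.List.pyGetD pvBase p ' ' then p else t) st.2
          (st.1 + temp * N ^ (((x.toList.length : Int)) - i - 1).toNat, temp)) st).1 ∧
      0 ≤ (L.foldl
        (fun (st : Int × Int) i =>
          let temp := (PySem.List.pyRange 0 (pvBase.length : Int) 1).foldl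
            (fun t p => if PySem.List.pyGetD x.toList i ' ' = PySem.List.pyGetD pvBase p ' ' then p else t) st.2
          (st.1 + temp * N ^ (((x.toList.length : Int)) - i - 1).toNat, temp)) st).2 := by
    intro L
    induction L with
    | nil => intro st h1 h2; exact ⟨h1, h2⟩
    | cons a as ih =>
      intro st h1 h2
      simp only [List.foldl_cons]
      apply ih
      · have htemp : 0 ≤ (PySem.List.pyRange 0 (pvBase.length : Int) 1).foldl
            (fun t p => if PySem.List.pyGetD x.toList a ' ' = PySem.List.pyGetD pvBase p ' ' then p else t) st.2 := by
          apply foldl_pick_nonneg x.toList a _ _ st.2 h2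
          intro p hp
          exact (PySem.List.mem_pyRange_one.mp hp).1
        have : 0 ≤ N ^ (((x.toList.length : Int)) - a - 1).toNat := pow_nonneg hN _
        positivity
      · apply foldl_pick_nonneg x.toList a _ _ st.2 h2
        intro p hp
        exact (PySem.List.mem_pyRange_one.mp hp).1
  exact (aux _ (0,0) le_rfl le_rfl).1

theorem main_eq (N : Int) (start end_ : String) (counts : List String)
    (hPre : pvParse N end_ < pvParse N start ∨
      (2 ≤ N ∧ N ≤ 62 ∧ pvParse N end_ - pvParse N start + 1 ≤ (counts.length : Int))) :
    solution N start end_ counts = solution_alt N start end_ counts := by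
  simp only [solution, solution_alt]
  set a := pvParse N start with ha_def
  set o := pvParse N end_ with ho_def
  by_cases hm : o - a + 1 ≤ 0
  · rw [if_pos hm]
    have hr : PySem.List.pyRange 0 (o - a + 1) 1 = [] := by
      rw [PySem.List.pyRange_one]
      have : (o - a + 1 - 0).toNat = 0 := by omega
      rw [this]; rfl
    rw [hr]
    simp only [List.foldl_nil, List.length_nil]
    rw [show ((0:Nat):Int) = 0 from rfl]
    rw [show PySem.List.pyRange 0 0 1 = [] from by rw [PySem.List.pyRange_one]; rfl]
    rfl
  · rw [if_neg hm]
    have hN : 2 ≤ N := by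
      rcases hPre with h | h
      · omega
      · exact h.1
    have ha : 0 ≤ a := pvParse_nonneg N (by omega) start
    set m : Int := o - a + 1 with hm_def
    set M : Nat := m.toNat with hM_def
    have hmM : (M : Int) = m := by omega
    rw [PySem.List.foldl_append_singleton_eq_map]
    simp only [List.nil_append, List.length_map, PySem.List.length_pyRange_one]
    have hlen : (((m - 0).toNat : Int)) = m := by omega
    rw [hlen]
    rw [PySem.List.pyRange_one 0 m]
    have hsub : (m - 0).toNat = M := by omega
    rw [hsub]
    rw [List.foldl_map, List.foldl_map]
    simp only [zero_add]
    rw [loop_eq N hN a ha (fun k => PySem.List.pyGetD counts ((k : Int)) "") M]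
    apply PySem.List.foldl_congr_mem
    intro acc k hk
    have hkM : k < M := List.mem_range.mp hk
    have hidx : PySem.List.pyGetD (List.map (fun i => String.mk (transA N (a + i))) (List.map (fun k : Nat => (k:Int)) (List.range M))) ((k:Int)) "" = String.mk (transA N (a + (k:Int))) := by
      rw [List.map_map, PySem.List.pyGetD_natCast]
      simp [List.getD_eq_getElem?_getD, hkM]
    rw [hidx, transA_render N hN (a + (k:Int)) (by omega)]

-- ===== VERDICT (by name: the statement is the Claim_ definition above) =====
theorem solution_spec : Claim_equal_solution := by
  intro N start end_ counts _ hPre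
  exact main_eq N start end_ counts hPre
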